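-- pv_equiv track=rewrite | github.com/EydlinIlya/israel-fruits | scraped_recipes/pipeline.py | _compute_mv
-- ===== SOURCE A (Python) =====
-- DISH_PENALTY     = 3    # subtracted per extra same-type recipe within a month
--
-- def _compute_mv(month: int, uid_list: list, full_matrix: dict, dish_types: dict) -> int:
--     total = sum(full_matrix.get(uid, {}).get(month, 0) for uid in uid_list)
--     type_counts: dict = {}
--     for uid in uid_list:
--         t = dish_types.get(uid, "Other")
--         type_counts[t] = type_counts.get(t, 0) + 1
--     for t, c in type_counts.items():
--         if c > 1:
--             total -= DISH_PENALTY * (c - 1)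
--     return total
-- ===== SOURCE B (Python) =====
-- DISH_PENALTY = 3
--
--
-- def _compute_mv(month: int, uid_list: list, full_matrix: dict, dish_types: dict) -> int:
--     # Single streaming pass: add each uid's value as we go and charge the
--     # penalty immediately whenever the uid's dish type was already seen.
--     total = 0
--     seen = set()
--     for uid in uid_list:
--         total += full_matrix.get(uid, {}).get(month, 0)
--         t = dish_types.get(uid, "Other")
--         if t in seen:
--             total -= DISH_PENALTY
--         else:
--             seen.add(t)
--     return total
-- ===== Notes on version B (the rewrite author's own statement) =====
-- stated objective: alternative
-- what changed: A makes three staged passes (sum all values, build a per-type Counter dict, then loop over the counter items subtracting 3*(c-1)); B is one streaming pass with a seen-types set that adds each value and subtracts the 3-point penalty on the spot whenever the current uid's type was seen before, never counting anything.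
import Mathlib
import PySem

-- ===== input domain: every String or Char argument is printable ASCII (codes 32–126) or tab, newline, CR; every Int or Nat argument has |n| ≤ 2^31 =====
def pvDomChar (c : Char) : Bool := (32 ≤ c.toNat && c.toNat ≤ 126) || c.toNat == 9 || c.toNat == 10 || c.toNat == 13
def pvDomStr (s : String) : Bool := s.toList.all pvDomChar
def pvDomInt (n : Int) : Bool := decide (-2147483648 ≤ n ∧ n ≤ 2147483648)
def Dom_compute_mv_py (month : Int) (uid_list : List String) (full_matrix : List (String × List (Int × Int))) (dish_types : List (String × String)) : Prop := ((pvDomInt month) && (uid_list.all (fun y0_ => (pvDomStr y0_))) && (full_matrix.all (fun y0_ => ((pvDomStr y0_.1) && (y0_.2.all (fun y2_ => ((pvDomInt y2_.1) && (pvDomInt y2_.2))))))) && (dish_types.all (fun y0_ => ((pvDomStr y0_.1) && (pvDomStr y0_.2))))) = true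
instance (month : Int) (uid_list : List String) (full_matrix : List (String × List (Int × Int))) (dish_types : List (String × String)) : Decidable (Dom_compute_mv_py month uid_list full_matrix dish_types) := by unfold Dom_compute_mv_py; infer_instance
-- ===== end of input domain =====

-- B replaces A's three staged passes (sum, Counter dict, per-type subtraction loop) by one
-- streaming pass with a seen-types set that charges the 3-point penalty on the spot; objective: alternative.

-- ===== PORT A =====
def compute_mv_py (month : Int) (uid_list : List String) (full_matrix : List (String × List (Int × Int))) (dish_types : List (String × String)) : Int :=
  -- total = sum(full_matrix.get(uid, {}).get(month, 0) for uid in uid_list)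
  let total := uid_list.foldl
    (fun acc uid => acc + (PySem.Dict.mk ((PySem.Dict.mk full_matrix).getD uid [])).getD month 0) 0
  -- type_counts = {}; for uid in uid_list: t = dish_types.get(uid, "Other"); type_counts[t] = type_counts.get(t, 0) + 1
  let type_counts : PySem.Dict String Int := uid_list.foldl
    (fun d uid =>
      let t := (PySem.Dict.mk dish_types).getD uid "Other"
      d.insert t (d.getD t 0 + 1)) PySem.Dict.empty
  -- for t, c in type_counts.items(): if c > 1: total -= 3 * (c - 1)
  type_counts.items.foldl (fun tot p => if p.2 > 1 then tot - 3 * (p.2 - 1) else tot) total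

-- ===== PORT B =====
def compute_mv_py_alt (month : Int) (uid_list : List String) (full_matrix : List (String × List (Int × Int))) (dish_types : List (String × String)) : Int :=
  -- total = 0; seen = set()
  -- for uid in uid_list: total += value; t = type; if t in seen: total -= 3 else: seen.add(t)
  (uid_list.foldl
    (fun (st : Int × PySem.Set String) uid =>
      let total := st.1 + (PySem.Dict.mk ((PySem.Dict.mk full_matrix).getD uid [])).getD month 0
      let t := (PySem.Dict.mk dish_types).getD uid "Other"
      if PySem.Set.contains st.2 t then (total - 3, st.2)
      else (total, PySem.Set.add st.2 t))
    (0, PySem.Set.empty)).1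

-- ===== PRECONDITION & SPEC =====
def Spec_compute_mv_py (month : Int) (uid_list : List String) (full_matrix : List (String × List (Int × Int))) (dish_types : List (String × String)) (out : Int) : Prop := out = compute_mv_py_alt month uid_list full_matrix dish_types
instance (month : Int) (uid_list : List String) (full_matrix : List (String × List (Int × Int))) (dish_types : List (String × String)) (out : Int) : Decidable (Spec_compute_mv_py month uid_list full_matrix dish_types out) := by unfold Spec_compute_mv_py; infer_instance

-- ===== CLAIM (what is proved, stated in full; the proofs are below) =====
def Claim_equal_compute_mv_py : Prop := ∀ (month : Int) (uid_list : List String) (full_matrix : List (String × List (Int × Int))) (dish_types : List (String × String)), Dom_compute_mv_py month uid_list full_matrix dish_types → Spec_compute_mv_py month uid_list full_matrix dish_types (compute_mv_py month uid_list full_matrix dish_types)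

-- ===== LEMMAS AND PROOFS =====

-- A's penalty loop, abstractly: folding "if c > 1 subtract 3*(c-1)" subtracts a sum.
theorem penalty_foldl (l : List (String × Int)) (t : Int) :
    l.foldl (fun tot p => if p.2 > 1 then tot - 3 * (p.2 - 1) else tot) t
      = t - 3 * (l.map (fun p => if p.2 > 1 then p.2 - 1 else 0)).sum := by
  induction l generalizing t with
  | nil => simp
  | cons p l ih =>
    simp only [List.foldl_cons, List.map_cons, List.sum_cons, ih]
    split_ifs <;> ring

theorem sum_map_sub_one (S : List String) (f : String → Int) :
    (S.map (fun k => f k - 1)).sum = (S.map f).sum - (S.length : Int) := by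
  induction S with
  | nil => simp
  | cons a S ih => simp [ih]; ring

-- A's value as a closed form: sum of values minus 3*(length - number of distinct types).
theorem compute_mv_py_closed (month : Int) (uid_list : List String)
    (full_matrix : List (String × List (Int × Int))) (dish_types : List (String × String)) :
    compute_mv_py month uid_list full_matrix dish_types
      = (uid_list.map (fun uid => (PySem.Dict.mk ((PySem.Dict.mk full_matrix).getD uid [])).getD month 0)).sum
        - 3 * ((uid_list.length : Int)
          - ((PySem.Set.ofList (uid_list.map (fun uid => (PySem.Dict.mk dish_types).getD uid "Other"))).length : Int)) := by
  unfold compute_mv_py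
  simp only []
  set g : String → Int :=
    fun uid => (PySem.Dict.mk ((PySem.Dict.mk full_matrix).getD uid [])).getD month 0 with hg
  set f : String → String := fun uid => (PySem.Dict.mk dish_types).getD uid "Other" with hf
  set ts : List String := uid_list.map f with hts
  have htot : uid_list.foldl (fun acc uid => acc + g uid) 0 = (uid_list.map g).sum := by
    rw [List.sum_eq_foldl, List.foldl_map]
  have hcounter :
      uid_list.foldl (fun d uid => d.insert (f uid) (d.getD (f uid) 0 + 1)) PySem.Dict.empty
        = PySem.Dict.counter ts := by
    rw [hts, ← PySem.Dict.foldl_insert_getD_add_one_eq_counter, List.foldl_map]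
  rw [htot, hcounter, PySem.Dict.items_counter, penalty_foldl, List.map_map]
  set S : List String := PySem.Set.ofList ts with hS
  have hmemS : ∀ k ∈ S, k ∈ ts := fun k hk => (PySem.Set.mem_ofList ts k).1 hk
  have hmap : S.map ((fun p : String × Int => if p.2 > 1 then p.2 - 1 else 0) ∘
        fun k => (k, (ts.count k : Int)))
      = S.map (fun k => (ts.count k : Int) - 1) := by
    apply List.map_congr_left
    intro k hk
    have h1 : 1 ≤ ts.count k := List.count_pos_iff.2 (hmemS k hk)
    simp only [Function.comp]
    split_ifs with h
    · rfl
    · have : ts.count k = 1 := le_antisymm (by exact_mod_cast not_lt.1 (by simpa using h)) h1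
      simp [this]
  rw [hmap, sum_map_sub_one]
  have hnodup : S.Nodup := PySem.Set.nodup_ofList ts
  have hfin : S.toFinset = ts.toFinset := by
    ext x
    simp [List.mem_toFinset, PySem.Set.mem_ofList, hS]
  have hsumnat : (S.map (fun k => ts.count k)).sum = ts.length := by
    rw [← List.sum_toFinset _ hnodup, hfin, List.sum_toFinset_count_eq_length]
  have hsum : (S.map (fun k => (ts.count k : Int))).sum = (ts.length : Int) := by
    have := congrArg (fun n : ℕ => (n : Int)) hsumnat
    push_cast at this
    simpa using this
  rw [hsum]
  have hlen : ts.length = uid_list.length := by simp [hts]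
  rw [hlen]

-- B's single pass, abstractly: result = tot + sum of values - 3 * (number of steps whose type
-- was already in the running seen set) = tot + Σ - 3*(len + |s| - |s after inserting all types|).
theorem b_fold (f : String → String) (g : String → Int) (l : List String)
    (tot : Int) (s : PySem.Set String) :
    (l.foldl
      (fun (st : Int × PySem.Set String) uid =>
        let total := st.1 + g uid
        let t := f uid
        if PySem.Set.contains st.2 t then (total - 3, st.2)
        else (total, PySem.Set.add st.2 t)) (tot, s)).1
    = tot + (l.map g).sum
      - 3 * ((l.length : Int) + (s.length : Int) - (((l.map f).foldl PySem.Set.add s).length : Int)) := by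
  induction l generalizing tot s with
  | nil => simp
  | cons a l ih =>
    simp only [List.foldl_cons, List.map_cons, List.sum_cons, List.length_cons]
    by_cases hmem : f a ∈ s
    · have hc : PySem.Set.contains s (f a) = true := (PySem.Set.contains_iff s (f a)).2 hmem
      have hadd : PySem.Set.add s (f a) = s := PySem.Set.add_of_mem hmem
      simp only [hc, if_pos, hadd, ih]
      push_cast
      ring
    · have hc : PySem.Set.contains s (f a) = false := by
        by_contra h
        exact hmem ((PySem.Set.contains_iff s (f a)).1 (by simpa using h))
      have hadd : PySem.Set.add s (f a) = s ++ [f a] := PySem.Set.add_of_not_mem hmem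
      simp only [hc, if_neg, Bool.false_eq_true, not_false_iff, ih, hadd]
      simp only [List.length_append, List.length_singleton]
      push_cast
      ring

-- ===== VERDICT (by name: the statement is the Claim_ definition above) =====
theorem compute_mv_py_spec : Claim_equal_compute_mv_py := by
  intro month uid_list full_matrix dish_types _
  unfold Spec_compute_mv_py
  rw [compute_mv_py_closed]
  unfold compute_mv_py_alt
  rw [b_fold]
  rw [PySem.Set.ofList_eq_foldl]
  simp [PySem.Set.empty]
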